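-- pv_equiv track=rewrite | github.com/fadyNabil16/Kenken-Game | kenken.py | gneighbors
-- ===== SOURCE A (Python) =====
-- def RowXorCol(xy1, xy2):
--     # return true if the two cells in the same raw or in the same column
--     return (xy1[0] == xy2[0]) != (xy1[1] == xy2[1])
--
-- def conflicting(A, a, B, b):
--
--     for i in range(len(A)):
--         for j in range(len(B)):
--             mA = A[i]
--             mB = B[j]
--
--             ma = a[i]
--             mb = b[j]
--             if RowXorCol(mA, mB) and ma == mb:
--                 """"
--                 if RowXorCol(mA, mB) evaluates to true and
--                 the value of mA in 'assignment' a is equal to the value of mb in 'assignment' b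
--
--                 """
--                 return True
--
--     return False
--
-- def gneighbors(cliques):
--
--     neighbors = {}
--     for members, _, _ in cliques:
--         neighbors[members] = []
--
--     for A, _, _ in cliques:
--         for B, _, _ in cliques:
--             if A != B and B not in neighbors[A]:
--                #if they are probable to 'conflict' they are considered neighbors
--                 if conflicting(A, [-1] * len(A), B, [-1] * len(B)):
--                     neighbors[A].append(B)
--                     neighbors[B].append(A)
--
--     return neighbors
-- ===== SOURCE B (Python) =====
-- def gneighbors(cliques):
--     # distinct members tuples in first-occurrence order (same collapsing as dict keys)
--     keys = list(dict.fromkeys(members for members, _, _ in cliques))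
--     # per-clique row/column index: row -> set of cols, col -> set of rows
--     index = {}
--     for k in keys:
--         rows, cols = {}, {}
--         for r, c in k:
--             rows.setdefault(r, set()).add(c)
--             cols.setdefault(c, set()).add(r)
--         index[k] = (rows, cols)
--
--     def conflict(x, y):
--         rows, cols = index[y]
--         for r, c in x:
--             cs = rows.get(r)
--             if cs is not None and any(c2 != c for c2 in cs):
--                 return True
--             rs = cols.get(c)
--             if rs is not None and any(r2 != r for r2 in rs):
--                 return True
--         return False
--
--     return {k: [k2 for k2 in keys if k2 != k and conflict(k, k2)] for k in keys}
-- ===== Notes on version B (the rewrite author's own statement) =====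
-- stated objective: alternative
-- what changed: Replaces A's mutating symmetric-append neighbor dict with its all-pairs cell-by-cell conflict scans (and dummy assignment lists) by a precomputed per-clique row/column index (row->cols, col->rows) used for the conflict test, building each neighbor list directly as a filter of the deduplicated key list; it trades A's early-exit double scan for index lookups.
import Mathlib
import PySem

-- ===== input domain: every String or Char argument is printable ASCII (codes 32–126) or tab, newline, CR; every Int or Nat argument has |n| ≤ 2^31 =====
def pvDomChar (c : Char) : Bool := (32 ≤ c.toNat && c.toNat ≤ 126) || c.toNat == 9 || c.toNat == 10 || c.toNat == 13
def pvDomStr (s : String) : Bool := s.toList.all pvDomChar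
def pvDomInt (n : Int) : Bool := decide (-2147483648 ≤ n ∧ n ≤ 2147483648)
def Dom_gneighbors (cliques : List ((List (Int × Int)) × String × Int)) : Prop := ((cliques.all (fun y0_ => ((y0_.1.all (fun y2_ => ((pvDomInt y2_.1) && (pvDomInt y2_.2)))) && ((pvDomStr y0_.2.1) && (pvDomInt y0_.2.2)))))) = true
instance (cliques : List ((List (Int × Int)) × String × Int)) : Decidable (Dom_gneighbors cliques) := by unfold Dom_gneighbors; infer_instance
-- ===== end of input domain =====

-- B replaces A's mutating symmetric-append neighbor dict and all-pairs cell-by-cell scans by a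
-- precomputed per-clique row/column index used for the conflict test, building the result directly
-- (objective: alternative algorithm of similar cost; neither version mutates its argument).

-- ===== PORT A =====
def RowXorCol (xy1 xy2 : Int × Int) : Bool :=
  (xy1.1 == xy2.1) != (xy1.2 == xy2.2)

-- the early-return-True double loop over indices is `any`/`any`; both indices are in range,
-- so xs[i] is ported as pyGetD with a dummy default (never used)
def conflicting (A : List (Int × Int)) (a : List Int) (B : List (Int × Int)) (b : List Int) : Bool :=
  (PySem.List.pyRange 0 (PySem.List.len A) 1).any (fun i =>
    (PySem.List.pyRange 0 (PySem.List.len B) 1).any (fun j =>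
      RowXorCol (PySem.List.pyGetD A i ((0 : Int), (0 : Int))) (PySem.List.pyGetD B j ((0 : Int), (0 : Int)))
        && (PySem.List.pyGetD a i (0 : Int) == PySem.List.pyGetD b j (0 : Int))))

-- neighbors[A] is read with getD []: every members tuple of cliques was inserted by the first loop,
-- so the default is never used (no KeyError); the returned dict is its items association list
def gneighbors (cliques : List ((List (Int × Int)) × String × Int)) : List (List (Int × Int) × List (List (Int × Int))) :=
  let init : PySem.Dict (List (Int × Int)) (List (List (Int × Int))) :=
    cliques.foldl (fun d c => d.insert c.1 []) ⟨[]⟩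
  let final : PySem.Dict (List (Int × Int)) (List (List (Int × Int))) :=
    cliques.foldl (fun d A =>
      cliques.foldl (fun d B =>
        if (!(A.1 == B.1)) && !((d.getD A.1 []).contains B.1) then
          if conflicting A.1 (PySem.List.pyRepeat [(-1 : Int)] (PySem.List.len A.1))
                          B.1 (PySem.List.pyRepeat [(-1 : Int)] (PySem.List.len B.1)) then
            (d.modify A.1 [] (fun l => l ++ [B.1])).modify B.1 [] (fun l => l ++ [A.1])
          else d
        else d) d) init
  final.items

-- ===== PORT B =====
-- rows.setdefault(r, set()).add(c) is modify r ∅ (add · c); the one loop filling the two dicts is a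
-- fold over the pair of dicts
def buildIndex1 (k : List (Int × Int)) : PySem.Dict Int (PySem.Set Int) × PySem.Dict Int (PySem.Set Int) :=
  k.foldl (fun rc p =>
    (rc.1.modify p.1 [] (fun s => PySem.Set.add s p.2),
     rc.2.modify p.2 [] (fun s => PySem.Set.add s p.1))) (⟨[]⟩, ⟨[]⟩)

-- index[y] is read with getD (⟨[]⟩, ⟨[]⟩): conflict is only called on y ∈ keys, all of which are in
-- index; the early-return loop with the two `any` generators is `any` of `||`
def conflictB (index : PySem.Dict (List (Int × Int)) (PySem.Dict Int (PySem.Set Int) × PySem.Dict Int (PySem.Set Int)))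
    (x y : List (Int × Int)) : Bool :=
  let rc := index.getD y (⟨[]⟩, ⟨[]⟩)
  x.any (fun p =>
    (match rc.1.get? p.1 with
     | some cs => cs.any (fun c2 => c2 != p.2)
     | none => false)
    || (match rc.2.get? p.2 with
        | some rs => rs.any (fun r2 => r2 != p.1)
        | none => false))

-- the final dict comprehension is keyed by the distinct keys in order, so its items list is this map
def gneighbors_alt (cliques : List ((List (Int × Int)) × String × Int)) : List (List (Int × Int) × List (List (Int × Int))) :=
  let keys := PySem.List.dedup (cliques.map (fun c => c.1))
  let index := keys.foldl (fun d k => d.insert k (buildIndex1 k)) ⟨[]⟩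
  keys.map (fun k => (k, keys.filter (fun k2 => (!(k2 == k)) && conflictB index k k2)))

-- ===== PRECONDITION & SPEC =====
def Spec_gneighbors (cliques : List ((List (Int × Int)) × String × Int)) (out : List (List (Int × Int) × List (List (Int × Int)))) : Prop := out = gneighbors_alt cliques
instance (cliques : List ((List (Int × Int)) × String × Int)) (out : List (List (Int × Int) × List (List (Int × Int)))) : Decidable (Spec_gneighbors cliques out) := by unfold Spec_gneighbors; infer_instance

-- ===== CLAIM (what is proved, stated in full; the proofs are below) =====
def Claim_equal_gneighbors : Prop := ∀ (cliques : List ((List (Int × Int)) × String × Int)), Dom_gneighbors cliques → Spec_gneighbors cliques (gneighbors cliques)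

-- ===== LEMMAS AND PROOFS =====

-- the conflict relation both programs decide: some cell of x and some cell of y share a row or a
-- column but not both
def conf (x y : List (Int × Int)) : Bool :=
  x.any (fun p => y.any (fun q => RowXorCol p q))

def qB (k k2 : List (Int × Int)) : Bool := (!(k2 == k)) && conf k k2

-- neighbor lists of A's dict after the outer loop has processed the distinct-members prefix S
def nb (S keys : List (List (Int × Int))) (k : List (Int × Int)) : List (List (Int × Int)) :=
  keys.filter (fun k2 => qB k k2 && decide (k ∈ S ∨ k2 ∈ S))

-- dict whose items are keys.map (k, val k)
def dmk (keys : List (List (Int × Int))) (val : List (Int × Int) → List (List (Int × Int))) :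
    PySem.Dict (List (Int × Int)) (List (List (Int × Int))) :=
  ⟨keys.map (fun k => (k, val k))⟩

-- A's inner-loop state while outer key a is processed and `done` is the set of members tuples the
-- inner loop has seen so far
def ival (S : List (List (Int × Int))) (a : List (Int × Int)) (keys done : List (List (Int × Int)))
    (k : List (Int × Int)) : List (List (Int × Int)) :=
  if k = a then keys.filter (fun k2 => qB a k2 && decide (k2 ∈ S ∨ k2 ∈ done))
  else if conf a k = true ∧ k ∈ done ∧ k ∉ S then nb S keys k ++ [a]
  else nb S keys k

-- A's inner-loop body, with conflicting already evaluated on the dummy assignments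
def stepA (a : List (Int × Int)) (d : PySem.Dict (List (Int × Int)) (List (List (Int × Int))))
    (b : List (Int × Int)) : PySem.Dict (List (Int × Int)) (List (List (Int × Int))) :=
  if (!(a == b)) && !((d.getD a []).contains b) then
    if conf a b then (d.modify a [] (fun l => l ++ [b])).modify b [] (fun l => l ++ [a])
    else d
  else d

lemma rxc_iff (p q : Int × Int) :
    RowXorCol p q = true ↔ (p.1 = q.1 ∧ ¬ p.2 = q.2) ∨ (¬ p.1 = q.1 ∧ p.2 = q.2) := by
  simp only [RowXorCol]
  rcases Bool.eq_false_or_eq_true (p.1 == q.1) with h1 | h1 <;>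
    rcases Bool.eq_false_or_eq_true (p.2 == q.2) with h2 | h2 <;>
      simp_all

lemma rxc_symm (p q : Int × Int) : RowXorCol p q = RowXorCol q p := by
  simp only [RowXorCol]
  rw [show (p.1 == q.1) = (q.1 == p.1) by simp [eq_comm],
      show (p.2 == q.2) = (q.2 == p.2) by simp [eq_comm]]

lemma conf_symm (x y : List (Int × Int)) : conf x y = conf y x := by
  rw [Bool.eq_iff_iff]
  simp only [conf, List.any_eq_true]
  constructor
  · rintro ⟨p, hp, q, hq, h⟩; exact ⟨q, hq, p, hp, (rxc_symm q p ▸ h)⟩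
  · rintro ⟨p, hp, q, hq, h⟩; exact ⟨q, hq, p, hp, (rxc_symm q p ▸ h)⟩

lemma conflicting_eq (A B : List (Int × Int)) :
    conflicting A (PySem.List.pyRepeat [(-1 : Int)] (PySem.List.len A))
               B (PySem.List.pyRepeat [(-1 : Int)] (PySem.List.len B)) = conf A B := by
  rw [Bool.eq_iff_iff]
  simp only [conflicting, conf, List.any_eq_true, PySem.List.pyRepeat_singleton,
    PySem.List.len_eq, PySem.List.mem_pyRange_one, Int.toNat_natCast]
  constructor
  · rintro ⟨i, ⟨hi0, hiA⟩, j, ⟨hj0, hjB⟩, h⟩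
    rw [PySem.List.pyGetD_eq_getElem A _ hi0 (by simpa using hiA),
        PySem.List.pyGetD_eq_getElem B _ hj0 (by simpa using hjB)] at h
    simp only [Bool.and_eq_true] at h
    exact ⟨_, List.getElem_mem _, _, List.getElem_mem _, h.1⟩
  · rintro ⟨p, hp, q, hq, h⟩
    obtain ⟨i, hi, rfl⟩ := List.mem_iff_getElem.1 hp
    obtain ⟨j, hj, rfl⟩ := List.mem_iff_getElem.1 hq
    refine ⟨i, ⟨by positivity, by exact_mod_cast hi⟩, j, ⟨by positivity, by exact_mod_cast hj⟩, ?_⟩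
    rw [PySem.List.pyGetD_eq_getElem A _ (by positivity) (by simpa using hi),
        PySem.List.pyGetD_eq_getElem B _ (by positivity) (by simpa using hj)]
    simp only [Int.toNat_natCast, Bool.and_eq_true]
    refine ⟨h, ?_⟩
    rw [PySem.List.pyGetD_eq_getElem _ _ (by positivity) (by simpa using hi),
        PySem.List.pyGetD_eq_getElem _ _ (by positivity) (by simpa using hj)]
    simp

-- ---------- dmk (assoc-list dict of shape keys.map (k, val k)) ----------

lemma dmk_congr {keys : List (List (Int × Int))} {v1 v2 : List (Int × Int) → List (List (Int × Int))}
    (h : ∀ k ∈ keys, v1 k = v2 k) : dmk keys v1 = dmk keys v2 := by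
  unfold dmk
  congr 1
  exact List.map_congr_left (fun k hk => by rw [h k hk])

lemma dmk_get?_of_mem {keys : List (List (Int × Int))} (hnd : keys.Nodup)
    {a : List (Int × Int)} (ha : a ∈ keys) (val : List (Int × Int) → List (List (Int × Int))) :
    (dmk keys val).get? a = some (val a) := by
  induction keys with
  | nil => cases ha
  | cons k ks ih =>
    show (PySem.Dict.mk ((k, val k) :: ks.map (fun k => (k, val k)))).get? a = some (val a)
    rw [PySem.Dict.get?_mk_cons]
    by_cases hka : k = a
    · subst hka; simp
    · have : (k == a) = false := by simp [hka]
      rw [this]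
      simp only [Bool.false_eq_true, if_false]
      exact ih hnd.of_cons ((List.mem_cons.1 ha).resolve_left (fun h => hka h.symm))

lemma dmk_getD_of_mem {keys : List (List (Int × Int))} (hnd : keys.Nodup)
    {a : List (Int × Int)} (ha : a ∈ keys) (val : List (Int × Int) → List (List (Int × Int))) :
    (dmk keys val).getD a [] = val a := by
  simp [PySem.Dict.getD, dmk_get?_of_mem hnd ha val]

lemma dmk_contains (keys : List (List (Int × Int))) (val : List (Int × Int) → List (List (Int × Int)))
    (a : List (Int × Int)) : (dmk keys val).contains a = decide (a ∈ keys) := by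
  unfold dmk PySem.Dict.contains
  rw [Bool.eq_iff_iff]
  simp [List.any_eq_true]

lemma dmk_insert_of_mem {keys : List (List (Int × Int))} {a : List (Int × Int)} (ha : a ∈ keys)
    (val : List (Int × Int) → List (List (Int × Int))) (v : List (List (Int × Int))) :
    (dmk keys val).insert a v = dmk keys (fun k => if k = a then v else val k) := by
  have hc : (dmk keys val).contains a = true := by simp [dmk_contains, ha]
  simp only [PySem.Dict.insert, hc, if_pos]
  show PySem.Dict.mk ((keys.map (fun k => (k, val k))).map _) = _
  unfold dmk
  rw [List.map_map]
  congr 1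
  apply List.map_congr_left
  intro k _
  by_cases hka : k = a
  · subst hka; simp
  · simp [Function.comp, hka]

lemma dmk_insert_of_not_mem {keys : List (List (Int × Int))} {a : List (Int × Int)} (ha : a ∉ keys)
    (val : List (Int × Int) → List (List (Int × Int))) (v : List (List (Int × Int))) :
    (dmk keys val).insert a v = dmk (keys ++ [a]) (fun k => if k = a then v else val k) := by
  have hc : (dmk keys val).contains a = false := by simp [dmk_contains, ha]
  simp only [PySem.Dict.insert, hc]
  show PySem.Dict.mk ((keys.map (fun k => (k, val k))) ++ [(a, v)]) = _
  unfold dmk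
  rw [List.map_append,
    List.map_congr_left (l := keys) (f := fun k => (k, val k))
      (g := fun k => (k, if k = a then v else val k))
      (fun k hk => by have hka : ¬ k = a := fun h => ha (h ▸ hk); simp [hka])]
  simp

lemma dmk_modify_of_mem {keys : List (List (Int × Int))} (hnd : keys.Nodup)
    {a : List (Int × Int)} (ha : a ∈ keys) (val : List (Int × Int) → List (List (Int × Int)))
    (f : List (List (Int × Int)) → List (List (Int × Int))) :
    (dmk keys val).modify a [] f = dmk keys (fun k => if k = a then f (val a) else val k) := by
  simp only [PySem.Dict.modify, dmk_getD_of_mem hnd ha, dmk_insert_of_mem ha]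

-- ---------- filters restricted to a prefix ----------

lemma band_decide_congr (b : Bool) {P Q : Prop} [Decidable P] [Decidable Q] (h : P ↔ Q) :
    (b && decide P) = (b && decide Q) := by rw [decide_eq_decide.2 h]

lemma filt_pref (q : List (Int × Int) → Bool) {keys W : List (List (Int × Int))}
    (hnd : keys.Nodup) (h : W <+: keys) :
    keys.filter (fun x => q x && decide (x ∈ W)) = W.filter q := by
  obtain ⟨t, rfl⟩ := h
  rw [List.filter_append]
  have hdis := (List.nodup_append.1 hnd).2.2
  have h1 : W.filter (fun x => q x && decide (x ∈ W)) = W.filter q :=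
    List.filter_congr (fun x hx => by simp [hx])
  have h2 : t.filter (fun x => q x && decide (x ∈ W)) = [] := by
    rw [List.filter_eq_nil_iff]
    intro x hx
    have : x ∉ W := fun hW => (hdis x hW x hx rfl)
    simp [this]
  rw [h1, h2, List.append_nil]

-- ---------- generic fixed-point fold ----------

lemma foldl_fixed {α β : Type} (f : α → β → α) (st : α) :
    ∀ l : List β, (∀ b ∈ l, f st b = st) → l.foldl f st = st := by
  intro l
  induction l with
  | nil => intro _; rfl
  | cons b l ih =>
    intro h
    rw [List.foldl_cons, h b (List.mem_cons_self ..)]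
    exact ih (fun x hx => h x (List.mem_cons_of_mem _ hx))

-- ---------- A side: the initialisation loop ----------

lemma init_go : ∀ (l keys : List (List (Int × Int))),
    l.foldl (fun d m => d.insert m ([] : List (List (Int × Int)))) (dmk keys (fun _ => [])) =
      dmk (PySem.Set.update keys l) (fun _ => []) := by
  intro l
  induction l with
  | nil => intro keys; rw [PySem.Set.update_nil]; rfl
  | cons m l ih =>
    intro keys
    rw [List.foldl_cons, PySem.Set.update_cons]
    by_cases hm : m ∈ keys
    · rw [dmk_insert_of_mem hm, PySem.Set.add_of_mem hm,
        dmk_congr (v2 := fun _ => []) (fun k _ => by split <;> rfl)]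
      exact ih keys
    · rw [dmk_insert_of_not_mem hm, PySem.Set.add_of_not_mem hm,
        dmk_congr (v2 := fun _ => []) (fun k _ => by split <;> rfl)]
      exact ih (keys ++ [m])

-- ---------- A side: one inner-loop step preserves the invariant ----------

lemma ival_add_skip {S done : List (List (Int × Int))} {a : List (Int × Int)}
    (keys : List (List (Int × Int))) {b : List (Int × Int)}
    (h : b = a ∨ conf a b = false ∨ b ∈ S ∨ b ∈ done) :
    ∀ k, ival S a keys (PySem.Set.add done b) k = ival S a keys done k := by
  intro k
  by_cases hbd : b ∈ done
  · rw [PySem.Set.add_of_mem hbd]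
  rw [PySem.Set.add_of_not_mem hbd]
  unfold ival
  by_cases hka : k = a
  · subst hka
    simp only [if_pos rfl]
    apply List.filter_congr
    intro x _
    by_cases hxb : x = b
    · subst hxb
      rcases h with h | h | h | h
      · subst h; simp [qB]
      · simp [qB, h]
      · apply band_decide_congr
        constructor <;> intro _ <;> exact Or.inl h
      · exact absurd h hbd
    · apply band_decide_congr
      have : x ∈ done ++ [b] ↔ x ∈ done := by simp [hxb]
      rw [this]
  · simp only [if_neg hka]
    have hiff : (conf a k = true ∧ k ∈ done ++ [b] ∧ k ∉ S) ↔ (conf a k = true ∧ k ∈ done ∧ k ∉ S) := by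
      by_cases hkb : k = b
      · subst hkb
        rcases h with h | h | h | h
        · exact absurd h hka
        · simp [h]
        · simp [h]
        · exact absurd h hbd
      · have : k ∈ done ++ [b] ↔ k ∈ done := by simp [hkb]
        rw [this]
    rw [if_congr hiff rfl rfl]

lemma subset_done_of_active {keys S done : List (List (Int × Int))} {a b : List (Int × Int)}
    (hS' : S ++ [a] <+: keys) (hdpre : done <+: keys)
    (hdpre' : done ++ [b] <+: keys) (hbS : b ∉ S) : S ⊆ done := by
  have hS : S <+: keys := (List.prefix_append S [a]).trans hS'
  rcases List.prefix_or_prefix_of_prefix hS hdpre with h | h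
  · exact h.subset
  · -- done <+: S : show S = done
    obtain ⟨s', rfl⟩ := h
    cases s' with
    | nil => simp
    | cons c s'' =>
      exfalso
      have hc : done ++ c :: s'' <+: keys := hS
      rcases List.prefix_or_prefix_of_prefix hdpre' hc with h2 | h2
      · rw [List.prefix_append_right_inj] at h2
        obtain ⟨t, ht⟩ := h2
        have hbc : b = c := by simpa using congrArg List.head? ht
        apply hbS
        rw [hbc]
        simp
      · rw [List.prefix_append_right_inj] at h2
        obtain ⟨t, ht⟩ := h2
        have hcb : c = b := by
          have h3 := congrArg List.head? ht
          simpa using h3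
        apply hbS
        rw [← hcb]
        simp
      
lemma inner_step {keys S done : List (List (Int × Int))} {a b : List (Int × Int)} (hnd : keys.Nodup)
    (hS' : S ++ [a] <+: keys) (haS : a ∉ S) (hb : b ∈ keys)
    (hdpre : done <+: keys) (hdpre' : PySem.Set.add done b <+: keys) :
    stepA a (dmk keys (ival S a keys done)) b = dmk keys (ival S a keys (PySem.Set.add done b)) := by
  have haK : a ∈ keys := hS'.subset (by simp)
  have hgetA : (dmk keys (ival S a keys done)).getD a [] =
      keys.filter (fun k2 => qB a k2 && decide (k2 ∈ S ∨ k2 ∈ done)) := by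
    rw [dmk_getD_of_mem hnd haK]
    simp [ival]
  by_cases hba : b = a
  · subst hba
    have : (!(b == b)) = false := by simp
    unfold stepA
    rw [this]
    simp only [Bool.false_and, Bool.false_eq_true, if_false]
    exact (dmk_congr (fun k _ => (ival_add_skip keys (Or.inl rfl) k))).symm
  · by_cases hconf : conf a b = true
    · by_cases hbSd : b ∈ S ∨ b ∈ done
      · -- b already a neighbor of a: skipped
        have hmem : b ∈ keys.filter (fun k2 => qB a k2 && decide (k2 ∈ S ∨ k2 ∈ done)) := by
          rw [List.mem_filter]
          refine ⟨hb, ?_⟩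
          simp [qB, hconf, hbSd, hba]
        unfold stepA
        rw [hgetA]
        have : (keys.filter (fun k2 => qB a k2 && decide (k2 ∈ S ∨ k2 ∈ done))).contains b = true :=
          List.contains_iff_mem.2 hmem
        rw [this]
        simp only [Bool.not_true, Bool.and_false, Bool.false_eq_true, if_false]
        refine (dmk_congr (fun k _ => (ival_add_skip keys ?_ k))).symm
        rcases hbSd with h | h
        · exact Or.inr (Or.inr (Or.inl h))
        · exact Or.inr (Or.inr (Or.inr h))
      · -- active case: append b to a's list and a to b's list
        rw [not_or] at hbSd
        obtain ⟨hbS, hbdone⟩ := hbSd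
        rw [PySem.Set.add_of_not_mem hbdone] at hdpre' ⊢
        have hSd : S ⊆ done := subset_done_of_active hS' hdpre hdpre' hbS
        have hnotmem : b ∉ keys.filter (fun k2 => qB a k2 && decide (k2 ∈ S ∨ k2 ∈ done)) := by
          rw [List.mem_filter]
          rintro ⟨-, hpred⟩
          simp only [Bool.and_eq_true, decide_eq_true_eq] at hpred
          rcases hpred.2 with h | h
          · exact hbS h
          · exact hbdone h
        unfold stepA
        rw [hgetA]
        have hcont : (keys.filter (fun k2 => qB a k2 && decide (k2 ∈ S ∨ k2 ∈ done))).contains b = false :=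
          Bool.eq_false_iff.2 (fun h => hnotmem (List.contains_iff_mem.1 h))
        rw [hcont]
        have hab0 : (a == b) = false := beq_eq_false_iff_ne.2 (fun h => hba h.symm)
        rw [hab0]
        simp only [Bool.not_false, Bool.and_true, if_pos, hconf]
        rw [dmk_modify_of_mem hnd haK]
        rw [dmk_modify_of_mem hnd hb]
        have hab : ¬ a = b := fun h => hba h.symm
        have hfa : keys.filter (fun x => qB a x && decide (x ∈ S ∨ x ∈ done)) =
            done.filter (qB a) := by
          rw [List.filter_congr (fun x _ => band_decide_congr _ (or_iff_right_of_imp (hSd ·)))]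
          exact filt_pref _ hnd hdpre
        have hfa' : keys.filter (fun x => qB a x && decide (x ∈ S ∨ x ∈ done ++ [b])) =
            done.filter (qB a) ++ [b] := by
          rw [List.filter_congr (fun x _ => band_decide_congr _
            (or_iff_right_of_imp (fun hxS => List.mem_append_left _ (hSd hxS))))]
          rw [filt_pref _ hnd hdpre', List.filter_append]
          congr 1
          simp [qB, hconf, hba]
        apply dmk_congr
        intro k hk
        by_cases hkb : k = b
        · subst hkb
          simp only [if_neg hba]
          unfold ival
          rw [if_neg hba, if_neg hba,
            if_neg (show ¬(conf a k = true ∧ k ∈ done ∧ k ∉ S) from fun h => hbdone h.2.1),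
            if_pos (show conf a k = true ∧ k ∈ done ++ [k] ∧ k ∉ S from ⟨hconf, by simp, hbS⟩)]
          simp
        · by_cases hka : k = a
          · subst hka
            simp only [if_neg hkb]
            unfold ival
            rw [if_pos rfl, if_pos rfl, hfa, hfa']
            simp
          · simp only [if_neg hkb, if_neg hka]
            unfold ival
            rw [if_neg hka, if_neg hka]
            refine if_congr ?_ rfl rfl
            have : k ∈ done ++ [b] ↔ k ∈ done := by simp [hkb]
            rw [this]
    · -- no conflict: inner if is the else branch
      have hconf' : conf a b = false := Bool.eq_false_iff.2 hconf
      unfold stepA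
      rw [hconf']
      have : (dmk keys (ival S a keys (PySem.Set.add done b))) = dmk keys (ival S a keys done) :=
        dmk_congr (fun k _ => ival_add_skip keys (Or.inr (Or.inl hconf')) k)
      rw [this]
      split <;> rfl



lemma ival_entry {S : List (List (Int × Int))} {a : List (Int × Int)}
    (keys : List (List (Int × Int))) (haS : a ∉ S) :
    ∀ k, k ∈ keys → nb S keys k = ival S a keys [] k := by
  intro k _
  unfold ival
  by_cases hka : k = a
  · subst hka
    rw [if_pos rfl]
    unfold nb
    apply List.filter_congr
    intro x _
    exact band_decide_congr _ (by simp [haS])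
  · rw [if_neg hka,
      if_neg (show ¬(conf a k = true ∧ k ∈ ([] : List (List (Int × Int))) ∧ k ∉ S) from
        fun h => List.not_mem_nil h.2.1)]

lemma ival_exit {keys S : List (List (Int × Int))} {a : List (Int × Int)} (hnd : keys.Nodup)
    (hS' : S ++ [a] <+: keys) (haS : a ∉ S) :
    ∀ k, k ∈ keys → ival S a keys keys k = nb (S ++ [a]) keys k := by
  intro k hk
  have hS : S <+: keys := (List.prefix_append S [a]).trans hS'
  by_cases hka : k = a
  · subst hka
    unfold ival nb
    rw [if_pos rfl]
    have he : List.filter (fun k2 => qB k k2 && decide (k2 ∈ S ∨ k2 ∈ keys)) keys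
        = List.filter (fun k2 => qB k k2 && decide (k ∈ S ++ [k] ∨ k2 ∈ S ++ [k])) keys :=
      List.filter_congr (fun x hx => band_decide_congr (qB k x) (iff_of_true (Or.inr hx)
        (Or.inl (List.mem_append_right S (List.mem_singleton.2 rfl)))))
    rw [he]
  · unfold ival
    rw [if_neg hka]
    by_cases hkS : k ∈ S
    · rw [if_neg (fun h => h.2.2 hkS)]
      unfold nb
      apply List.filter_congr
      intro x _
      exact band_decide_congr _ (iff_of_true (Or.inl hkS) (Or.inl (List.mem_append_left _ hkS)))
    · have hkS' : k ∉ S ++ [a] := by simp [hkS, hka]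
      have hnbk : nb S keys k = S.filter (qB k) := by
        unfold nb
        rw [List.filter_congr (fun x _ => band_decide_congr (qB k x) (or_iff_right hkS))]
        exact filt_pref _ hnd hS
      have hnb' : nb (S ++ [a]) keys k = S.filter (qB k) ++ List.filter (qB k) [a] := by
        unfold nb
        rw [List.filter_congr (fun x _ => band_decide_congr (qB k x) (or_iff_right hkS'))]
        rw [filt_pref _ hnd hS', List.filter_append]
      by_cases hconf : conf a k = true
      · rw [if_pos ⟨hconf, hk, hkS⟩, hnbk, hnb']
        have hq : qB k a = true := by
          have hca : conf k a = true := (conf_symm k a).trans hconf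
          have h1 : (a == k) = false := beq_eq_false_iff_ne.2 (fun h => hka h.symm)
          simp [qB, hca, h1]
        simp [hq]
      · rw [if_neg (fun h => hconf h.1), hnbk, hnb']
        have hq : qB k a = false := by
          have hca : conf k a = false := (conf_symm k a).trans (Bool.eq_false_iff.2 hconf)
          simp [qB, hca]
        simp [hq]

lemma inner_go {keys S : List (List (Int × Int))} {a : List (Int × Int)} (hnd : keys.Nodup)
    (hS' : S ++ [a] <+: keys) (haS : a ∉ S) :
    ∀ (rest done : List (List (Int × Int))), PySem.Set.update done rest = keys →
      done <+: keys →
      rest.foldl (stepA a) (dmk keys (ival S a keys done)) = dmk keys (ival S a keys keys) := by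
  intro rest
  induction rest with
  | nil =>
    intro done hupd _
    rw [PySem.Set.update_nil] at hupd
    subst hupd
    rfl
  | cons b rest ih =>
    intro done hupd hdpre
    have hb : b ∈ keys := by
      rw [← hupd]
      exact (PySem.Set.mem_update _ _ _).2 (Or.inr (by simp))
    have hupd' : PySem.Set.update (PySem.Set.add done b) rest = keys := by
      rw [← PySem.Set.update_cons]; exact hupd
    have hdpre' : PySem.Set.add done b <+: keys := by
      rw [← hupd', PySem.Set.update_eq_append_filter]
      exact List.prefix_append _ _
    rw [List.foldl_cons, inner_step hnd hS' haS hb hdpre hdpre']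
    exact ih (PySem.Set.add done b) hupd' hdpre'

lemma inner_skip {keys ms S : List (List (Int × Int))} {A : List (Int × Int)} (hnd : keys.Nodup)
    (hkeys : PySem.Set.ofList ms = keys) (hA : A ∈ S) (hS : S <+: keys) :
    ms.foldl (stepA A) (dmk keys (nb S keys)) = dmk keys (nb S keys) := by
  apply foldl_fixed
  intro b hbms
  have hb : b ∈ keys := by rw [← hkeys]; exact (PySem.Set.mem_ofList _ _).2 hbms
  have hAk : A ∈ keys := hS.subset hA
  unfold stepA
  rw [dmk_getD_of_mem hnd hAk]
  by_cases hba : A = b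
  · have : (A == b) = true := beq_iff_eq.2 hba
    rw [this]
    rfl
  · by_cases hconf : conf A b = true
    · have hmem : b ∈ nb S keys A := by
        unfold nb
        rw [List.mem_filter]
        refine ⟨hb, ?_⟩
        have h1 : (b == A) = false := beq_eq_false_iff_ne.2 (fun h => hba h.symm)
        simp [qB, hconf, h1, Or.inl hA]
      have hcont : (nb S keys A).contains b = true := List.contains_iff_mem.2 hmem
      rw [hcont]
      simp
    · have hcf : conf A b = false := Bool.eq_false_iff.2 hconf
      simp only [hcf]
      split <;> simp


lemma outer_go {keys ms : List (List (Int × Int))} (hnd : keys.Nodup)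
    (hkeys : PySem.Set.ofList ms = keys) :
    ∀ (orest S : List (List (Int × Int))), PySem.Set.update S orest = keys → S <+: keys →
      orest.foldl (fun d a => ms.foldl (stepA a) d) (dmk keys (nb S keys)) =
        dmk keys (nb keys keys) := by
  intro orest
  induction orest with
  | nil =>
    intro S hupd _
    rw [PySem.Set.update_nil] at hupd
    subst hupd
    rfl
  | cons A orest ih =>
    intro S hupd hSpre
    rw [List.foldl_cons]
    by_cases hA : A ∈ S
    · rw [inner_skip hnd hkeys hA hSpre]
      apply ih
      · rw [PySem.Set.update_cons, PySem.Set.add_of_mem hA] at hupd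
        exact hupd
      · exact hSpre
    · have hupd' : PySem.Set.update (S ++ [A]) orest = keys := by
        rw [PySem.Set.update_cons, PySem.Set.add_of_not_mem hA] at hupd
        exact hupd
      have hS' : (S ++ [A]) <+: keys := by
        rw [← hupd', PySem.Set.update_eq_append_filter]
        exact List.prefix_append _ _
      rw [dmk_congr (ival_entry keys hA),
        inner_go hnd hS' hA ms []
          (by
            have h := PySem.Set.update_empty ms
            exact h.trans hkeys)
          (List.nil_prefix),
        dmk_congr (ival_exit hnd hS' hA)]
      exact ih (S ++ [A]) hupd' hS'

-- ---------- B side ----------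

lemma get?_foldl_insert_skip {ν : Type} (f : List (Int × Int) → ν) {y : List (Int × Int)} :
    ∀ (l : List (List (Int × Int))) (d : PySem.Dict (List (Int × Int)) ν), y ∉ l →
      (l.foldl (fun d k => d.insert k (f k)) d).get? y = d.get? y := by
  intro l
  induction l with
  | nil => intro d _; rfl
  | cons k l ih =>
    intro d hy
    rw [List.foldl_cons, ih _ (fun h => hy (List.mem_cons_of_mem _ h))]
    exact PySem.Dict.get?_insert_of_ne _ _ (fun h => hy (h ▸ List.mem_cons_self ..))

lemma get?_foldl_insert_mem {ν : Type} (f : List (Int × Int) → ν) {y : List (Int × Int)} :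
    ∀ (l : List (List (Int × Int))) (d : PySem.Dict (List (Int × Int)) ν), l.Nodup → y ∈ l →
      (l.foldl (fun d k => d.insert k (f k)) d).get? y = some (f y) := by
  intro l
  induction l with
  | nil => intro d _ hy; cases hy
  | cons k l ih =>
    intro d hnd hy
    rw [List.foldl_cons]
    by_cases hyk : y = k
    · subst hyk
      have hyl : y ∉ l := (List.nodup_cons.1 hnd).1
      rw [get?_foldl_insert_skip f l _ hyl]
      exact PySem.Dict.get?_insert_self _ _ _
    · exact ih _ (List.nodup_cons.1 hnd).2 ((List.mem_cons.1 hy).resolve_left hyk)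

lemma rowcol_getD_mem (key pval : Int × Int → Int) :
    ∀ (l : List (Int × Int)) (d : PySem.Dict Int (PySem.Set Int)) (r v : Int),
      (v ∈ (l.foldl (fun d p => d.modify (key p) [] (fun s => PySem.Set.add s (pval p))) d).getD r []) ↔
        v ∈ d.getD r [] ∨ ∃ p ∈ l, key p = r ∧ pval p = v := by
  intro l
  induction l with
  | nil => intro d r v; simp
  | cons p l ih =>
    intro d r v
    rw [List.foldl_cons, ih, PySem.Dict.getD_modify]
    by_cases hr : r = key p
    · rw [if_pos hr, PySem.Set.mem_add]
      constructor
      · rintro ((h | h) | h)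
        · exact Or.inl (hr ▸ h)
        · exact Or.inr ⟨p, by simp, hr.symm, h.symm⟩
        · obtain ⟨q, hq, h1, h2⟩ := h
          exact Or.inr ⟨q, List.mem_cons_of_mem _ hq, h1, h2⟩
      · rintro (h | h)
        · exact Or.inl (Or.inl (hr ▸ h))
        · obtain ⟨q, hq, h1, h2⟩ := h
          rcases List.mem_cons.1 hq with rfl | hq
          · exact Or.inl (Or.inr h2.symm)
          · exact Or.inr ⟨q, hq, h1, h2⟩
    · rw [if_neg hr]
      constructor
      · rintro (h | h)
        · exact Or.inl h
        · obtain ⟨q, hq, h1, h2⟩ := h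
          exact Or.inr ⟨q, List.mem_cons_of_mem _ hq, h1, h2⟩
      · rintro (h | h)
        · exact Or.inl h
        · obtain ⟨q, hq, h1, h2⟩ := h
          rcases List.mem_cons.1 hq with rfl | hq
          · exact absurd h1 (fun he => hr he.symm)
          · exact Or.inr ⟨q, hq, h1, h2⟩

lemma matchAny (d : PySem.Dict Int (PySem.Set Int)) (r : Int) (f : Int → Bool) :
    (match d.get? r with
     | some cs => cs.any f
     | none => false) = (d.getD r []).any f := by
  cases h : d.get? r <;> simp [PySem.Dict.getD, h]

lemma conflictB_eq {keys : List (List (Int × Int))} (hnd : keys.Nodup)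
    (x : List (Int × Int)) {y : List (Int × Int)} (hy : y ∈ keys) :
    conflictB (keys.foldl (fun d k => d.insert k (buildIndex1 k)) ⟨[]⟩) x y = conf x y := by
  have hidx : (keys.foldl (fun d k => d.insert k (buildIndex1 k))
      (⟨[]⟩ : PySem.Dict (List (Int × Int)) (PySem.Dict Int (PySem.Set Int) × PySem.Dict Int (PySem.Set Int)))).getD
        y (⟨[]⟩, ⟨[]⟩) = buildIndex1 y := by
    simp [PySem.Dict.getD, get?_foldl_insert_mem buildIndex1 keys _ hnd hy]
  have hsplit : buildIndex1 y =
      (y.foldl (fun d p => d.modify p.1 [] (fun s => PySem.Set.add s p.2)) ⟨[]⟩,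
       y.foldl (fun d p => d.modify p.2 [] (fun s => PySem.Set.add s p.1)) ⟨[]⟩) := by
    unfold buildIndex1
    exact PySem.List.foldl_prod_mk
      (fun (d : PySem.Dict Int (PySem.Set Int)) (p : Int × Int) => d.modify p.1 [] (fun s => PySem.Set.add s p.2))
      (fun (d : PySem.Dict Int (PySem.Set Int)) (p : Int × Int) => d.modify p.2 [] (fun s => PySem.Set.add s p.1))
      y ⟨[]⟩ ⟨[]⟩
  unfold conflictB
  rw [hidx, hsplit]
  rw [Bool.eq_iff_iff]
  simp only [matchAny, conf, List.any_eq_true, Bool.or_eq_true]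
  constructor
  · rintro ⟨p, hp, h | h⟩
    · obtain ⟨c2, hc2, hne⟩ := h
      rw [rowcol_getD_mem] at hc2
      rcases hc2 with h0 | ⟨q, hq, h1, h2⟩
      · exact (List.not_mem_nil h0).elim
      · refine ⟨p, hp, q, hq, (rxc_iff p q).2 (Or.inl ⟨h1.symm, ?_⟩)⟩
        rw [h2]
        exact fun he => (bne_iff_ne.1 hne) he.symm
    · obtain ⟨r2, hr2, hne⟩ := h
      rw [rowcol_getD_mem] at hr2
      rcases hr2 with h0 | ⟨q, hq, h1, h2⟩
      · exact (List.not_mem_nil h0).elim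
      · refine ⟨p, hp, q, hq, (rxc_iff p q).2 (Or.inr ⟨?_, h1.symm⟩)⟩
        rw [h2]
        exact fun he => (bne_iff_ne.1 hne) he.symm
  · rintro ⟨p, hp, q, hq, h⟩
    rcases (rxc_iff p q).1 h with ⟨h1, h2⟩ | ⟨h1, h2⟩
    · refine ⟨p, hp, Or.inl ⟨q.2, ?_, bne_iff_ne.2 (fun he => h2 he.symm)⟩⟩
      rw [rowcol_getD_mem]
      exact Or.inr ⟨q, hq, h1.symm, rfl⟩
    · refine ⟨p, hp, Or.inr ⟨q.1, ?_, bne_iff_ne.2 (fun he => h1 he.symm)⟩⟩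
      rw [rowcol_getD_mem]
      exact Or.inr ⟨q, hq, h2.symm, rfl⟩

-- ===== VERDICT (by name: the statement is the Claim_ definition above) =====
theorem gneighbors_spec : Claim_equal_gneighbors := by
  intro cliques _
  unfold Spec_gneighbors
  have hnd : (PySem.Set.ofList (cliques.map (fun c => c.1))).Nodup :=
    PySem.Set.nodup_ofList _
  -- A's port as a double fold over the members lists, starting from the initialised dict
  have e1 : cliques.foldl (fun d c => d.insert c.1 ([] : List (List (Int × Int))))
        (⟨[]⟩ : PySem.Dict (List (Int × Int)) (List (List (Int × Int)))) =
      (cliques.map (fun c => c.1)).foldl (fun d m => d.insert m []) ⟨[]⟩ :=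
    (List.foldl_map (f := fun (c : (List (Int × Int)) × String × Int) => c.1)
      (g := fun (d : PySem.Dict (List (Int × Int)) (List (List (Int × Int))))
        (m : List (Int × Int)) => d.insert m [])).symm
  have e3 : (cliques.map (fun c => c.1)).foldl (fun d m => d.insert m [])
        (⟨[]⟩ : PySem.Dict (List (Int × Int)) (List (List (Int × Int)))) =
      dmk (PySem.Set.ofList (cliques.map (fun c => c.1))) (fun _ => []) := by
    have h := init_go (cliques.map (fun c => c.1)) []
    have h2 : PySem.Set.update [] (cliques.map (fun c => c.1)) =
        PySem.Set.ofList (cliques.map (fun c => c.1)) := PySem.Set.update_empty _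
    rw [h2] at h
    exact h
  have e4 : dmk (PySem.Set.ofList (cliques.map (fun c => c.1))) (fun _ => []) =
      dmk (PySem.Set.ofList (cliques.map (fun c => c.1)))
        (nb [] (PySem.Set.ofList (cliques.map (fun c => c.1)))) := by
    apply dmk_congr
    intro k _
    simp [nb]
  have e2 : ∀ X : PySem.Dict (List (Int × Int)) (List (List (Int × Int))),
      cliques.foldl (fun d A =>
        cliques.foldl (fun d B =>
          if (!(A.1 == B.1)) && !((d.getD A.1 []).contains B.1) then
            if conflicting A.1 (PySem.List.pyRepeat [(-1 : Int)] (PySem.List.len A.1))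
                            B.1 (PySem.List.pyRepeat [(-1 : Int)] (PySem.List.len B.1)) then
              (d.modify A.1 [] (fun l => l ++ [B.1])).modify B.1 [] (fun l => l ++ [A.1])
            else d
          else d) d) X =
      (cliques.map (fun c => c.1)).foldl (fun d a => (cliques.map (fun c => c.1)).foldl (stepA a) d) X := by
    intro X
    rw [List.foldl_map (f := fun (c : (List (Int × Int)) × String × Int) => c.1)
      (g := fun (d : PySem.Dict (List (Int × Int)) (List (List (Int × Int))))
        (a : List (Int × Int)) => (cliques.map (fun c => c.1)).foldl (stepA a) d)]
    apply PySem.List.foldl_congr_mem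
    intro d A _
    rw [List.foldl_map (f := fun (c : (List (Int × Int)) × String × Int) => c.1)
      (g := stepA A.1)]
    apply PySem.List.foldl_congr_mem
    intro d' B _
    simp only [stepA, conflicting_eq]
  have hA : gneighbors cliques =
      (dmk (PySem.Set.ofList (cliques.map (fun c => c.1)))
        (nb (PySem.Set.ofList (cliques.map (fun c => c.1)))
            (PySem.Set.ofList (cliques.map (fun c => c.1))))).items := by
    have hg : gneighbors cliques =
        (cliques.foldl (fun d A =>
          cliques.foldl (fun d B =>
            if (!(A.1 == B.1)) && !((d.getD A.1 []).contains B.1) then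
              if conflicting A.1 (PySem.List.pyRepeat [(-1 : Int)] (PySem.List.len A.1))
                              B.1 (PySem.List.pyRepeat [(-1 : Int)] (PySem.List.len B.1)) then
                (d.modify A.1 [] (fun l => l ++ [B.1])).modify B.1 [] (fun l => l ++ [A.1])
              else d
            else d) d)
          (cliques.foldl (fun d c => d.insert c.1 ([] : List (List (Int × Int))))
            (⟨[]⟩ : PySem.Dict (List (Int × Int)) (List (List (Int × Int)))))).items := rfl
    rw [hg, e1, e3, e4, e2, outer_go hnd rfl (cliques.map (fun c => c.1)) []
      (show PySem.Set.update [] (cliques.map (fun c => c.1)) =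
          PySem.Set.ofList (cliques.map (fun c => c.1)) from
        PySem.Set.update_empty (cliques.map (fun (c : (List (Int × Int)) × String × Int) => c.1)))
      (List.nil_prefix)]
  rw [hA]
  show List.map _ _ = _
  unfold gneighbors_alt
  simp only [PySem.List.dedup]
  apply List.map_congr_left
  intro k hk
  refine Prod.ext rfl ?_
  show nb _ _ k = _
  unfold nb
  apply List.filter_congr
  intro x hx
  rw [conflictB_eq hnd k hx]
  have hdec : decide (k ∈ PySem.Set.ofList (cliques.map (fun c => c.1)) ∨
      x ∈ PySem.Set.ofList (cliques.map (fun c => c.1))) = true := by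
    simp [hk]
  rw [hdec]
  simp [qB]
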